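-- pv_equiv track=rewrite | github.com/oscargavin/tod-scraper | insert_fridge_freezers.py | extract_brand_model
-- ===== SOURCE A (Python) =====
-- def extract_brand_model(name: str) -> tuple[str, str]:
--     """Extract brand and model from product name."""
--     # Common fridge-freezer brands
--     brands = ['AEG', 'Bosch', 'Samsung', 'LG', 'Whirlpool', 'Hotpoint', 'Beko', 'Liebherr',
--               'Siemens', 'Miele', 'Haier', 'Hisense', 'Candy', 'Hoover', 'Fisher & Paykel',
--               'Fisher and Paykel', 'Smeg', 'Zanussi', 'Indesit', 'Gorenje', 'John Lewis',
--               'Bush', 'Ikea', 'Kenwood', 'Russell Hobbs', 'Logik', 'Essentials']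
--
--     name_upper = name.upper()
--     for brand in brands:
--         if name_upper.startswith(brand.upper()):
--             # Extract model as the rest after brand
--             model = name[len(brand):].strip()
--             if not model:
--                 model = name
--             return brand, model
--
--     # Fallback: split on first space
--     parts = name.split(' ', 1)
--     if len(parts) >= 2:
--         return parts[0], parts[1]
--     return name, name
-- ===== SOURCE B (Python) =====
-- _BRANDS = ('AEG|Bosch|Samsung|LG|Whirlpool|Hotpoint|Beko|Liebherr|Siemens|Miele|'
--            'Haier|Hisense|Candy|Hoover|Fisher & Paykel|Fisher and Paykel|Smeg|'
--            'Zanussi|Indesit|Gorenje|John Lewis|Bush|Ikea|Kenwood|Russell Hobbs|'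
--            'Logik|Essentials').split('|')
-- # Brands are case-insensitively prefix-free, so at most one can match the name:
-- # one hash probe per distinct brand length replaces the per-brand startswith scan.
-- _CANON = {b.lower(): b for b in _BRANDS}
-- _LENGTHS = sorted({len(b) for b in _BRANDS}, reverse=True)
--
--
-- def extract_brand_model(name: str) -> tuple[str, str]:
--     """Extract brand and model from product name."""
--     low = name.lower()
--     hit = next(((_CANON[low[:n]], n) for n in _LENGTHS if low[:n] in _CANON), None)
--     if hit is None:
--         parts = name.split(' ', 1)
--         return (parts[0], parts[1]) if len(parts) >= 2 else (name, name)
--     brand, n = hit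
--     model = name[n:].strip()
--     return brand, (model or name)
-- ===== Notes on version B (the rewrite author's own statement) =====
-- stated objective: alternative
-- what changed: A scans the brand list testing a case-insensitive startswith per brand; B keys a dict by lowercased brand and probes it with one lowercased name-prefix slice per distinct brand length (brands are case-insensitively prefix-free, so at most one can match), keeping the same split-on-first-space fallback.
import Mathlib
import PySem

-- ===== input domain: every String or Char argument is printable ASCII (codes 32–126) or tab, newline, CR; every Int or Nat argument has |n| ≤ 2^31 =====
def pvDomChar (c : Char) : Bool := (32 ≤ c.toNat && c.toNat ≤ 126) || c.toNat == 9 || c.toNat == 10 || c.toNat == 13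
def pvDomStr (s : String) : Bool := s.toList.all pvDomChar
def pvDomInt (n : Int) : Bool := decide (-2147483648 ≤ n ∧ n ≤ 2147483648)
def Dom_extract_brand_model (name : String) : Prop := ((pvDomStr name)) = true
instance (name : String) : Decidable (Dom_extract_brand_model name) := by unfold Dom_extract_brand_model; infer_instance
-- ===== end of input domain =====

-- B replaces A's per-brand case-insensitive startswith scan by a lowercase-keyed dict
-- probed once per distinct brand length (brands are case-insensitively prefix-free, so
-- at most one can match); objective: alternative (same behaviour, different structure).

-- ===== PORT A =====
def pvBrandsA : List String :=
  ["AEG", "Bosch", "Samsung", "LG", "Whirlpool", "Hotpoint", "Beko", "Liebherr",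
   "Siemens", "Miele", "Haier", "Hisense", "Candy", "Hoover", "Fisher & Paykel",
   "Fisher and Paykel", "Smeg", "Zanussi", "Indesit", "Gorenje", "John Lewis",
   "Bush", "Ikea", "Kenwood", "Russell Hobbs", "Logik", "Essentials"]

def pvLoopA (name : String) (nameUpper : String) : List String → String × String
  | [] =>
    -- fallback: parts = name.split(' ', 1) (split with sep ' ' never raises: getD is never used)
    let parts := (PySem.Str.splitMax? name " " 1).getD []
    if 2 ≤ parts.length then (PySem.List.pyGetD parts 0 "", PySem.List.pyGetD parts 1 "")
    else (name, name)
  | brand :: rest =>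
    if PySem.Str.startswith nameUpper (PySem.Str.upper brand) then
      let model := PySem.Str.strip (PySem.Str.slice name (some (PySem.Str.len brand)) none)
      (brand, if model = "" then name else model)
    else pvLoopA name nameUpper rest

def extract_brand_model (name : String) : String × String :=
  pvLoopA name (PySem.Str.upper name) pvBrandsA

-- ===== PORT B =====
-- _BRANDS = '…'.split('|')  ('|' is non-empty, so split? never raises: getD unused)
def pvBrandListB : List String :=
  ((PySem.Str.split? ("AEG|Bosch|Samsung|LG|Whirlpool|Hotpoint|Beko|Liebherr|Siemens|Miele|Haier|Hisense|Candy|Hoover|Fisher & Paykel|Fisher and Paykel|Smeg|Zanussi|Indesit|Gorenje|John Lewis|Bush|Ikea|Kenwood|Russell Hobbs|Logik|Essentials") "|").getD [])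

-- _CANON = {b.lower(): b for b in _BRANDS}
def pvCanonB : PySem.Dict String String :=
  pvBrandListB.foldl (fun d b => d.insert (PySem.Str.lower b) b) PySem.Dict.empty

-- _LENGTHS = sorted({len(b) for b in _BRANDS}, reverse=True)
def pvLengthsB : List Int :=
  PySem.List.sorted (PySem.Set.ofList (pvBrandListB.map PySem.Str.len)) id true

-- 'low = name.lower()' is inlined at its two uses (it is pure)
def extract_brand_model_alt (name : String) : String × String :=
  -- hit = next(((_CANON[low[:n]], n) for n in _LENGTHS if low[:n] in _CANON), None)
  match pvLengthsB.findSome? (fun n =>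
      (pvCanonB.get? (PySem.Str.slice (PySem.Str.lower name) none (some n))).map
        (fun br => (br, n))) with
  | none =>
    let parts := (PySem.Str.splitMax? name " " 1).getD []
    if 2 ≤ parts.length then (PySem.List.pyGetD parts 0 "", PySem.List.pyGetD parts 1 "")
    else (name, name)
  | some (brand, n) =>
    let model := PySem.Str.strip (PySem.Str.slice name (some n) none)
    (brand, if model = "" then name else model)

-- ===== PRECONDITION & SPEC =====
def Spec_extract_brand_model (name : String) (out : String × String) : Prop := out = extract_brand_model_alt name
instance (name : String) (out : String × String) : Decidable (Spec_extract_brand_model name out) := by unfold Spec_extract_brand_model; infer_instance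

-- ===== CLAIM (what is proved, stated in full; the proofs are below) =====
def Claim_equal_extract_brand_model : Prop := ∀ (name : String), Dom_extract_brand_model name → Spec_extract_brand_model name (extract_brand_model name)

-- ===== LEMMAS AND PROOFS =====

-- abbreviations used only by the proofs
def pvCond (name b : String) : Bool :=
  PySem.Str.startswith (PySem.Str.upper name) (PySem.Str.upper b)

def pvResA (name b : String) : String × String :=
  let model := PySem.Str.strip (PySem.Str.slice name (some (PySem.Str.len b)) none)
  (b, if model = "" then name else model)

def pvKey (name : String) (L : Int) : String :=
  PySem.Str.slice (PySem.Str.lower name) none (some L)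

def pvPairs : List (String × String) :=
  [("aeg", "AEG"), ("bosch", "Bosch"), ("samsung", "Samsung"), ("lg", "LG"),
   ("whirlpool", "Whirlpool"), ("hotpoint", "Hotpoint"), ("beko", "Beko"),
   ("liebherr", "Liebherr"), ("siemens", "Siemens"), ("miele", "Miele"),
   ("haier", "Haier"), ("hisense", "Hisense"), ("candy", "Candy"), ("hoover", "Hoover"),
   ("fisher & paykel", "Fisher & Paykel"), ("fisher and paykel", "Fisher and Paykel"),
   ("smeg", "Smeg"), ("zanussi", "Zanussi"), ("indesit", "Indesit"),
   ("gorenje", "Gorenje"), ("john lewis", "John Lewis"), ("bush", "Bush"),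
   ("ikea", "Ikea"), ("kenwood", "Kenwood"), ("russell hobbs", "Russell Hobbs"),
   ("logik", "Logik"), ("essentials", "Essentials")]

-- character-level facts about PySem's ASCII case maps
theorem pvOfNatToNat (n : Nat) (h : n < 55296) : (Char.ofNat n).toNat = n := by
  rw [Char.toNat_ofNat, if_pos (Or.inl h)]

theorem pvCharExt (a b : Char) (h : a.toNat = b.toNat) : a = b := Char.ext (UInt32.toNat_inj.mp h)

theorem pvCharUL (c : Char) :
    PySem.Chars.lowerChar (PySem.Chars.upperChar c) = PySem.Chars.lowerChar c := by
  simp only [PySem.Chars.upperChar, PySem.Chars.lowerChar, PySem.Chars.islower, PySem.Chars.isupper,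
    Bool.and_eq_true, decide_eq_true_eq, Char.le_def, UInt32.le_iff_toNat_le,
    show ('a').val.toNat = 97 from rfl, show ('z').val.toNat = 122 from rfl,
    show ('A').val.toNat = 65 from rfl, show ('Z').val.toNat = 90 from rfl,
    show ∀ x : Char, x.val.toNat = x.toNat from fun _ => rfl]
  split_ifs with h1 h2 h3 h3' h4
  · rw [pvOfNatToNat (c.toNat - 32) (by omega)]
    apply pvCharExt
    rw [pvOfNatToNat _ (by omega), pvOfNatToNat _ (by omega)]
    omega
  · rw [pvOfNatToNat (c.toNat - 32) (by omega)]
    apply pvCharExt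
    rw [pvOfNatToNat _ (by omega)]
    omega
  · exfalso; rw [pvOfNatToNat (c.toNat - 32) (by omega)] at h2; omega
  · exfalso; rw [pvOfNatToNat (c.toNat - 32) (by omega)] at h2; omega
  · rfl
  · rfl

theorem pvCharLU (c : Char) :
    PySem.Chars.upperChar (PySem.Chars.lowerChar c) = PySem.Chars.upperChar c := by
  simp only [PySem.Chars.upperChar, PySem.Chars.lowerChar, PySem.Chars.islower, PySem.Chars.isupper,
    Bool.and_eq_true, decide_eq_true_eq, Char.le_def, UInt32.le_iff_toNat_le,
    show ('a').val.toNat = 97 from rfl, show ('z').val.toNat = 122 from rfl,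
    show ('A').val.toNat = 65 from rfl, show ('Z').val.toNat = 90 from rfl,
    show ∀ x : Char, x.val.toNat = x.toNat from fun _ => rfl]
  split_ifs with h1 h2 h3 h3' h4
  · rw [pvOfNatToNat (c.toNat + 32) (by omega)]
    apply pvCharExt
    rw [pvOfNatToNat _ (by omega), pvOfNatToNat _ (by omega)]
    omega
  · rw [pvOfNatToNat (c.toNat + 32) (by omega)]
    apply pvCharExt
    rw [pvOfNatToNat _ (by omega)]
    omega
  · exfalso; rw [pvOfNatToNat (c.toNat + 32) (by omega)] at h2; omega
  · exfalso; rw [pvOfNatToNat (c.toNat + 32) (by omega)] at h2; omega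
  · rfl
  · rfl

theorem pvMapUL (xs ys : List Char) :
    xs.map PySem.Chars.upperChar = ys.map PySem.Chars.upperChar ↔
    xs.map PySem.Chars.lowerChar = ys.map PySem.Chars.lowerChar := by
  constructor
  · intro h
    have := congrArg (List.map PySem.Chars.lowerChar) h
    simpa [List.map_map, Function.comp_def, pvCharUL] using this
  · intro h
    have := congrArg (List.map PySem.Chars.upperChar) h
    simpa [List.map_map, Function.comp_def, pvCharLU] using this

-- A's test on brand b holds iff the lowercased name starts with the lowercased brand
theorem pvCond_iff (name b : String) :
    pvCond name b = true ↔
    (name.toList.take b.toList.length).map PySem.Chars.lowerChar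
      = b.toList.map PySem.Chars.lowerChar := by
  unfold pvCond
  rw [show PySem.Str.startswith (PySem.Str.upper name) (PySem.Str.upper b)
        = PySem.Chars.startswith (PySem.Str.upper name).toList (PySem.Str.upper b).toList from by
      simp]
  rw [PySem.Chars.startswith_iff]
  simp only [PySem.Str.toList_upper, PySem.Chars.upper]
  rw [List.prefix_iff_eq_take, List.length_map, ← List.map_take]
  rw [show (List.map PySem.Chars.upperChar b.toList
        = List.map PySem.Chars.upperChar (name.toList.take b.toList.length)) ↔
      (List.map PySem.Chars.lowerChar b.toList
        = List.map PySem.Chars.lowerChar (name.toList.take b.toList.length)) from pvMapUL _ _]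
  exact eq_comm

-- concrete facts about the brand table (checked by decide)
set_option maxRecDepth 20000 in
theorem pvCanonB_items : pvCanonB.items = pvPairs := by decide
set_option maxRecDepth 20000 in
theorem pvCanonB_nodup : pvCanonB.keys.Nodup := by decide
set_option maxRecDepth 20000 in
theorem pvPairs_sound : ∀ p ∈ pvPairs, p.2 ∈ pvBrandsA ∧
    p.1.toList = p.2.toList.map PySem.Chars.lowerChar := by decide
set_option maxRecDepth 20000 in
theorem pvPairs_complete : ∀ b ∈ pvBrandsA, (PySem.Str.lower b, b) ∈ pvPairs := by decide
set_option maxRecDepth 20000 in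
theorem pvPrefixFree : ∀ b1 ∈ pvBrandsA, ∀ b2 ∈ pvBrandsA,
    b1.toList.map PySem.Chars.lowerChar <+: b2.toList.map PySem.Chars.lowerChar → b1 = b2 := by decide
set_option maxRecDepth 20000 in
theorem pvLenMem : ∀ b ∈ pvBrandsA, PySem.Str.len b ∈ pvLengthsB := by decide
set_option maxRecDepth 20000 in
theorem pvLengthsNonneg : ∀ L ∈ pvLengthsB, 0 ≤ L := by decide

theorem pvHit_iff (k br : String) : pvCanonB.get? k = some br ↔ (k, br) ∈ pvPairs := by
  rw [PySem.Dict.get?_eq_some_iff_mem_items pvCanonB k br pvCanonB_nodup, pvCanonB_items]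

theorem pvKey_toList (name : String) (L : Int) (hL : 0 ≤ L) :
    (pvKey name L).toList = (name.toList.map PySem.Chars.lowerChar).take L.toNat := by
  unfold pvKey
  rw [PySem.Str.toList_slice, PySem.Chars.slice_eq_listSlice, PySem.List.slice_to _ hL,
    PySem.Str.toList_lower]
  rfl

-- A's loop, characterised
theorem pvLoopA_fallback (name u : String) (bs : List String)
    (h : ∀ b ∈ bs, PySem.Str.startswith u (PySem.Str.upper b) = false) :
    pvLoopA name u bs = pvLoopA name u [] := by
  induction bs with
  | nil => rfl
  | cons b rest ih =>
    conv_lhs => rw [pvLoopA]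
    rw [if_neg (by simpa using h b List.mem_cons_self)]
    exact ih fun x hx => h x (List.mem_cons_of_mem b hx)

theorem pvLoopA_of (name u : String) (bs : List String) (r : String × String)
    (h1 : ∃ b ∈ bs, PySem.Str.startswith u (PySem.Str.upper b) = true)
    (h2 : ∀ b ∈ bs, PySem.Str.startswith u (PySem.Str.upper b) = true →
      (let model := PySem.Str.strip (PySem.Str.slice name (some (PySem.Str.len b)) none)
       ((b, if model = "" then name else model) : String × String)) = r) :
    pvLoopA name u bs = r := by
  induction bs with
  | nil => simp at h1
  | cons b rest ih =>
    by_cases hb : PySem.Str.startswith u (PySem.Str.upper b) = true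
    · conv_lhs => rw [pvLoopA]
      rw [if_pos hb]
      exact h2 b List.mem_cons_self hb
    · conv_lhs => rw [pvLoopA]
      rw [if_neg hb]
      refine ih ?_ fun x hx hc => h2 x (List.mem_cons_of_mem b hx) hc
      obtain ⟨x, hx, hc⟩ := h1
      rcases List.mem_cons.mp hx with rfl | hx
      · exact absurd hc hb
      · exact ⟨x, hx, hc⟩

theorem pvUniq (name : String) {b1 b2 : String} (h1 : b1 ∈ pvBrandsA) (h2 : b2 ∈ pvBrandsA)
    (c1 : pvCond name b1 = true) (c2 : pvCond name b2 = true) : b1 = b2 := by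
  rw [pvCond_iff] at c1 c2
  have e1 : b1.toList.map PySem.Chars.lowerChar
      = (name.toList.map PySem.Chars.lowerChar).take b1.toList.length := by
    rw [← List.map_take, c1]
  have e2 : b2.toList.map PySem.Chars.lowerChar
      = (name.toList.map PySem.Chars.lowerChar).take b2.toList.length := by
    rw [← List.map_take, c2]
  rcases le_total b1.toList.length b2.toList.length with h | h
  · refine pvPrefixFree b1 h1 b2 h2 ?_
    rw [e1, e2, ← min_eq_left h, ← List.take_take]
    exact List.take_prefix _ _
  · refine (pvPrefixFree b2 h2 b1 h1 ?_).symm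
    rw [e1, e2, ← min_eq_left h, ← List.take_take]
    exact List.take_prefix _ _

theorem pvHit_cond (name : String) (L : Int) (hL : 0 ≤ L) {br : String}
    (h : pvCanonB.get? (pvKey name L) = some br) :
    br ∈ pvBrandsA ∧ pvCond name br = true ∧
      br.toList.length = min L.toNat name.toList.length := by
  rw [pvHit_iff] at h
  obtain ⟨hbmem, hkl⟩ := pvPairs_sound _ h
  have hkey := pvKey_toList name L hL
  have he : br.toList.map PySem.Chars.lowerChar
      = (name.toList.map PySem.Chars.lowerChar).take L.toNat := by
    rw [← hkl, hkey]
  have hlen : br.toList.length = min L.toNat name.toList.length := by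
    have := congrArg List.length he
    simpa using this
  refine ⟨hbmem, ?_, hlen⟩
  rw [pvCond_iff, List.map_take]
  have hk : br.toList.length ≤ L.toNat := by omega
  calc List.take br.toList.length (List.map PySem.Chars.lowerChar name.toList)
      = List.take br.toList.length
          (List.take L.toNat (List.map PySem.Chars.lowerChar name.toList)) := by
        rw [List.take_take, min_eq_left hk]
    _ = List.take br.toList.length (List.map PySem.Chars.lowerChar br.toList) := by
        rw [← he]
    _ = List.map PySem.Chars.lowerChar br.toList := by
        rw [show br.toList.length = (List.map PySem.Chars.lowerChar br.toList).length from by simp,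
          List.take_length]

theorem pvRes_eq (name : String) (L : Int) (hL : 0 ≤ L) {br : String}
    (hlen : br.toList.length = min L.toNat name.toList.length) :
    (let model := PySem.Str.strip (PySem.Str.slice name (some L) none)
     ((br, if model = "" then name else model) : String × String))
    = pvResA name br := by
  unfold pvResA
  rcases le_or_gt L.toNat name.toList.length with hle | hgt
  · have hLb : PySem.Str.len br = L := by
      rw [PySem.Str.len_eq, hlen, min_eq_left hle]
      omega
    rw [hLb]
  · have hA : PySem.Str.slice name (some (PySem.Str.len br)) none = "" := by
      rw [← String.toList_inj, PySem.Str.toList_slice, PySem.Chars.slice_eq_listSlice,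
        PySem.List.slice_from _ (by rw [PySem.Str.len_eq]; positivity)]
      exact List.drop_eq_nil_of_le (by
        rw [PySem.Str.len_eq]; simp only [Int.toNat_natCast]; omega)
    have hB : PySem.Str.slice name (some L) none = "" := by
      rw [← String.toList_inj, PySem.Str.toList_slice, PySem.Chars.slice_eq_listSlice,
        PySem.List.slice_from _ hL]
      exact List.drop_eq_nil_of_le (by omega)
    rw [hA, hB]

-- at L = len b, B's dict probe hits exactly the brand A's test accepts
theorem pvProbe_hit (name b : String) (hb : b ∈ pvBrandsA) (hc : pvCond name b = true) :
    pvCanonB.get? (pvKey name (PySem.Str.len b)) = some b := by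
  have hkeyEq : pvKey name (PySem.Str.len b) = PySem.Str.lower b := by
    rw [← String.toList_inj, pvKey_toList name _ (by rw [PySem.Str.len_eq]; positivity)]
    have hcnd := (pvCond_iff name b).mp hc
    rw [show (PySem.Str.len b).toNat = b.toList.length from by rw [PySem.Str.len_eq]; simp]
    rw [← List.map_take, hcnd, PySem.Str.toList_lower]
    rfl
  rw [hkeyEq]
  exact (PySem.Dict.get?_eq_some_iff_mem_items pvCanonB _ b pvCanonB_nodup).mpr
    (by rw [pvCanonB_items]; exact pvPairs_complete b hb)

-- ===== VERDICT (by name: the statement is the Claim_ definition above) =====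
set_option maxRecDepth 100000 in
set_option maxHeartbeats 2000000 in
theorem extract_brand_model_spec : Claim_equal_extract_brand_model := by
  intro name _
  unfold Spec_extract_brand_model extract_brand_model extract_brand_model_alt
  rcases hfs : pvLengthsB.findSome? (fun n =>
      (pvCanonB.get? (PySem.Str.slice (PySem.Str.lower name) none (some n))).map
        (fun br => (br, n))) with _ | ⟨br, L⟩
  · -- no length probe hits: no brand matches, both sides fall back identically
    simp only [List.findSome?_eq_none_iff] at hfs
    rw [pvLoopA_fallback name (PySem.Str.upper name) pvBrandsA
        (fun b hb => by
          rcases hv : PySem.Str.startswith (PySem.Str.upper name) (PySem.Str.upper b) with _ | _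
          · rfl
          · exfalso
            have := hfs (PySem.Str.len b) (pvLenMem b hb)
            rw [show PySem.Str.slice (PySem.Str.lower name) none (some (PySem.Str.len b))
                = pvKey name (PySem.Str.len b) from rfl,
              pvProbe_hit name b hb (by unfold pvCond; rw [hv])] at this
            simp at this)]
    rfl
  · -- a probe hit (br, L): A's scan finds exactly br, and the results coincide
    obtain ⟨n, hn, hf⟩ := List.exists_of_findSome?_eq_some hfs
    rw [Option.map_eq_some_iff] at hf
    obtain ⟨br', hbr', heq⟩ := hf
    injection heq with h1 h2
    subst h1; subst h2
    have hL := pvLengthsNonneg n hn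
    obtain ⟨hbrmem, hbrcond, hbrlen⟩ := pvHit_cond name n hL hbr'
    rw [pvLoopA_of name (PySem.Str.upper name) pvBrandsA (pvResA name br')
      ⟨br', hbrmem, hbrcond⟩
      (fun b hb hc => by rw [show b = br' from pvUniq name hb hbrmem hc hbrcond]; rfl)]
    exact (pvRes_eq name n hL hbrlen).symm
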